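-- pv_equiv track=rewrite | github.com/MDS-AnGe/RTPA_Studio | src/algorithms/hand_parser.py | _parse_compact_actions
-- ===== SOURCE A (Python) =====
-- from typing import Dict, List, Tuple, Any, Optional
--
-- def _parse_compact_actions(actions_str: str) -> List[str]:
--     """Parse actions format compact"""
--     actions = []
--
--     # Format type "cc/cc/cr200r19700f"
--     streets = actions_str.split('/')
--
--     for street in streets:
--         i = 0
--         while i < len(street):
--             if street[i] == 'f':
--                 actions.append('fold')
--                 i += 1
--             elif street[i] == 'c':
--                 actions.append('call')
--                 i += 1
--             elif street[i] == 'r':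
--                 # Extract bet size
--                 j = i + 1
--                 while j < len(street) and street[j].isdigit():
--                     j += 1
--                 if j > i + 1:
--                     bet_size = street[i+1:j]
--                     actions.append(f'raise_{bet_size}')
--                     i = j
--                 else:
--                     actions.append('raise')
--                     i += 1
--             else:
--                 i += 1
--
--     return actions
-- ===== SOURCE B (Python) =====
-- def _parse_compact_actions(actions_str: str):
--     """Parse actions format compact — single reverse pass, no split, no index arithmetic."""
--     out = []
--     digits = ''
--     for ch in reversed(actions_str):
--         if ch.isdigit():
--             digits = ch + digits
--         else:
--             if ch == 'r':
--                 out.append('raise_' + digits if digits else 'raise')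
--             elif ch == 'f':
--                 out.append('fold')
--             elif ch == 'c':
--                 out.append('call')
--             digits = ''
--     out.reverse()
--     return out
-- ===== Notes on version B (the rewrite author's own statement) =====
-- stated objective: alternative
-- what changed: A splits the string on the street separator and scans each street with a nested while-loop over indices (inner digit-scan loop); B makes one pass over the reversed string carrying the pending digit run, so the split, the index arithmetic and the inner loop all disappear.
import Mathlib
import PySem

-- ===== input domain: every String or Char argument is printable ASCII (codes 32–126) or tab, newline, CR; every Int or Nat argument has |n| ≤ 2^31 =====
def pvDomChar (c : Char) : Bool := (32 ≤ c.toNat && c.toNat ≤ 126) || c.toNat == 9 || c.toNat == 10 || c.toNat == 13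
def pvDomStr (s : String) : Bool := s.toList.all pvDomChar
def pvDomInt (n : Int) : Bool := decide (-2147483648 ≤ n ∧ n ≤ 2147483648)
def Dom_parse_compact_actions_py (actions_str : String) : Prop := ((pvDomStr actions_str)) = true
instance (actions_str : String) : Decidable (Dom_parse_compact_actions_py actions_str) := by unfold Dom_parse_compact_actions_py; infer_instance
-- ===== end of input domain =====

-- B replaces A's split-on-'/' plus nested index/while scanner by a single reverse pass that
-- carries the pending digit run; equal output on the ASCII domain (objective: alternative).


-- ===== PORT A =====
-- inner while-loop over one street (index i ↔ the remaining suffix; the digit-scan j ↔ takeWhile/dropWhile)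
def streetLoop : List Char → List String → List String
  | [], acc => acc
  | c :: rest, acc =>
    if c = 'f' then streetLoop rest (acc ++ ["fold"])
    else if c = 'c' then streetLoop rest (acc ++ ["call"])
    else if c = 'r' then
      let ds := rest.takeWhile PySem.Chars.isdigit
      if 0 < ds.length then
        streetLoop (rest.dropWhile PySem.Chars.isdigit) (acc ++ [String.mk ("raise_".toList ++ ds)])
      else streetLoop rest (acc ++ ["raise"])
    else streetLoop rest acc
termination_by l _ => l.length
decreasing_by
  all_goals (have := List.length_dropWhile_le (p := PySem.Chars.isdigit) rest; simp; try omega)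

def parse_compact_actions_py (actions_str : String) : List String :=
  (PySem.Chars.splitOn actions_str.toList ['/']).foldl (fun acc street => streetLoop street acc) []

-- ===== PORT B =====
-- single pass over the reversed string: `digits` is the pending digit run, `out` the reversed output
def bLoop : List Char → List Char → List String → List String
  | [], _, out => out
  | ch :: rest, digits, out =>
    if PySem.Chars.isdigit ch then bLoop rest (ch :: digits) out
    else
      let out' :=
        if ch = 'r' then out ++ [if digits = [] then "raise" else String.mk ("raise_".toList ++ digits)]
        else if ch = 'f' then out ++ ["fold"]
        else if ch = 'c' then out ++ ["call"]
        else out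
      bLoop rest [] out'

def parse_compact_actions_py_alt (actions_str : String) : List String :=
  (bLoop actions_str.toList.reverse [] []).reverse

-- ===== PRECONDITION & SPEC =====
def Spec_parse_compact_actions_py (actions_str : String) (out : List String) : Prop := out = parse_compact_actions_py_alt actions_str
instance (actions_str : String) (out : List String) : Decidable (Spec_parse_compact_actions_py actions_str out) := by unfold Spec_parse_compact_actions_py; infer_instance

-- ===== CLAIM (what is proved, stated in full; the proofs are below) =====
def Claim_equal_parse_compact_actions_py : Prop := ∀ (actions_str : String), Dom_parse_compact_actions_py actions_str → Spec_parse_compact_actions_py actions_str (parse_compact_actions_py actions_str)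

-- ===== LEMMAS AND PROOFS =====

-- f l = result of A's street loop with empty accumulator; conc = concatenation over streets
def sL (l : List Char) : List String := streetLoop l []
def conc (ps : List (List Char)) : List String := (ps.map sL).flatten

theorem streetLoop_acc_aux (n : Nat) : ∀ l : List Char, l.length ≤ n → ∀ acc : List String,
    streetLoop l acc = acc ++ streetLoop l [] := by
  induction n with
  | zero =>
    intro l hl acc
    have : l = [] := by cases l <;> simp_all
    subst this; simp [streetLoop]
  | succ n ih =>
    intro l hl acc
    cases l with
    | nil => simp [streetLoop]
    | cons c rest =>
      simp only [streetLoop]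
      have hr : rest.length ≤ n := by simp at hl; omega
      have hd : (rest.dropWhile PySem.Chars.isdigit).length ≤ n := by
        have := List.length_dropWhile_le (p := PySem.Chars.isdigit) rest; omega
      split_ifs with h1 h2 h3 h4
      · rw [ih rest hr (acc ++ ["fold"]), ih rest hr ([] ++ ["fold"])]; simp
      · rw [ih rest hr (acc ++ ["call"]), ih rest hr ([] ++ ["call"])]; simp
      · rw [ih _ hd (acc ++ [_]), ih _ hd ([] ++ [_])]; simp
      · rw [ih rest hr (acc ++ ["raise"]), ih rest hr ([] ++ ["raise"])]; simp
      · exact ih rest hr acc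

theorem streetLoop_acc (l : List Char) (acc : List String) :
    streetLoop l acc = acc ++ sL l := streetLoop_acc_aux l.length l le_rfl acc

theorem takeWhile_append_nil {p : Char → Bool} (xs ys : List Char) (hy : ys.takeWhile p = []) :
    (xs ++ ys).takeWhile p = xs.takeWhile p := by
  rw [List.takeWhile_append]
  split_ifs with h
  · rw [hy, (List.takeWhile_prefix p).eq_of_length h]; simp
  · rfl

theorem dropWhile_append_nil {p : Char → Bool} (xs ys : List Char) (hy : ys.takeWhile p = []) :
    (xs ++ ys).dropWhile p = xs.dropWhile p ++ ys := by
  rw [List.dropWhile_append]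
  split_ifs with h
  · have h' : xs.dropWhile p = [] := by simpa [List.isEmpty_iff] using h
    have h2 : ys.takeWhile p ++ ys.dropWhile p = ys := List.takeWhile_append_dropWhile
    rw [hy, List.nil_append] at h2
    rw [h2, h']; simp
  · rfl

theorem streetLoop_skip (c : Char) (l : List Char) (acc : List String)
    (h1 : c ≠ 'f') (h2 : c ≠ 'c') (h3 : c ≠ 'r') :
    streetLoop (c :: l) acc = streetLoop l acc := by
  simp only [streetLoop]
  split_ifs <;> simp_all

theorem takeWhile_cons_false {p : Char → Bool} (c : Char) (l : List Char) (h : p c = false) :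
    (c :: l).takeWhile p = [] := by simp [h]

theorem streetLoop_split_aux (n : Nat) : ∀ xs ys : List Char, xs.length ≤ n →
    ys.takeWhile PySem.Chars.isdigit = [] →
    sL (xs ++ ys) = sL xs ++ sL ys := by
  induction n with
  | zero =>
    intro xs ys hl hy
    have : xs = [] := by cases xs <;> simp_all
    subst this; simp [sL, streetLoop]
  | succ n ih =>
    intro xs ys hl hy
    cases xs with
    | nil => simp [sL, streetLoop]
    | cons c rest =>
      have hr : rest.length ≤ n := by simp at hl; omega
      have hd : (rest.dropWhile PySem.Chars.isdigit).length ≤ n := by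
        have := List.length_dropWhile_le (p := PySem.Chars.isdigit) rest; omega
      simp only [sL, List.cons_append, streetLoop]
      rw [takeWhile_append_nil rest ys hy, dropWhile_append_nil rest ys hy]
      split_ifs with h1 h2 h3 h4
      · simp only [streetLoop_acc, ih rest ys hr hy]; simp
      · simp only [streetLoop_acc, ih rest ys hr hy]; simp
      · simp only [streetLoop_acc, ih _ ys hd hy]; simp
      · simp only [streetLoop_acc, ih rest ys hr hy]; simp
      · exact ih rest ys hr hy

theorem streetLoop_split (xs ys : List Char) (hy : ys.takeWhile PySem.Chars.isdigit = []) :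
    sL (xs ++ ys) = sL xs ++ sL ys := streetLoop_split_aux xs.length xs ys le_rfl hy

theorem sL_digits (ds : List Char) (h : ∀ c ∈ ds, PySem.Chars.isdigit c = true) : sL ds = [] := by
  induction ds with
  | nil => simp [sL, streetLoop]
  | cons c ds ih =>
    have hc : PySem.Chars.isdigit c = true := h c (by simp)
    have h1 : c ≠ 'f' := by rintro rfl; exact absurd hc (by decide)
    have h2 : c ≠ 'c' := by rintro rfl; exact absurd hc (by decide)
    have h3 : c ≠ 'r' := by rintro rfl; exact absurd hc (by decide)
    rw [sL, streetLoop_skip c ds [] h1 h2 h3]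
    exact ih (fun x hx => h x (by simp [hx]))

theorem sL_r (ds : List Char) (h : ∀ c ∈ ds, PySem.Chars.isdigit c = true) :
    sL ('r' :: ds) = [if ds = [] then "raise" else String.mk ("raise_".toList ++ ds)] := by
  have htw : ds.takeWhile PySem.Chars.isdigit = ds := List.takeWhile_eq_self_iff.mpr h
  have hdw : ds.dropWhile PySem.Chars.isdigit = [] := List.dropWhile_eq_nil_iff.mpr h
  simp only [sL, streetLoop, htw, hdw]
  cases ds with
  | nil => simp [streetLoop]
  | cons d ds => simp

theorem sL_f (ds : List Char) (h : ∀ c ∈ ds, PySem.Chars.isdigit c = true) :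
    sL ('f' :: ds) = ["fold"] := by
  simp only [sL, streetLoop]
  simp [streetLoop_acc, sL_digits ds h]

theorem sL_c (ds : List Char) (h : ∀ c ∈ ds, PySem.Chars.isdigit c = true) :
    sL ('c' :: ds) = ["call"] := by
  simp only [sL, streetLoop]
  simp [streetLoop_acc, sL_digits ds h]

theorem bLoop_spec (rcs : List Char) : ∀ (digits : List Char) (out : List String),
    (∀ c ∈ digits, PySem.Chars.isdigit c = true) →
    (bLoop rcs digits out).reverse = sL (rcs.reverse ++ digits) ++ out.reverse := by
  induction rcs with
  | nil => intro digits out h; simp [bLoop, sL_digits digits h]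
  | cons ch rest ih =>
    intro digits out h
    simp only [bLoop]
    by_cases hdig : PySem.Chars.isdigit ch
    · rw [if_pos hdig,
        ih (ch :: digits) out (by intro x hx; rcases List.mem_cons.mp hx with rfl | hx; exacts [hdig, h x hx])]
      simp
    · rw [if_neg hdig]
      have hd' : PySem.Chars.isdigit ch = false := by simpa using hdig
      have hsplit : sL ((ch :: rest).reverse ++ digits) = sL rest.reverse ++ sL (ch :: digits) := by
        have e : (ch :: rest).reverse ++ digits = rest.reverse ++ (ch :: digits) := by simp
        rw [e]
        exact streetLoop_split rest.reverse (ch :: digits) (takeWhile_cons_false ch digits hd')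
      by_cases hr : ch = 'r'
      · subst hr
        rw [if_pos rfl, ih [] _ (by simp), hsplit, sL_r digits h]
        simp
      · by_cases hf : ch = 'f'
        · subst hf
          rw [if_neg (by decide), if_pos rfl, ih [] _ (by simp), hsplit, sL_f digits h]
          simp
        · by_cases hc : ch = 'c'
          · subst hc
            rw [if_neg (by decide), if_neg (by decide), if_pos rfl, ih [] _ (by simp), hsplit,
              sL_c digits h]
            simp
          · rw [if_neg hr, if_neg hf, if_neg hc, ih [] _ (by simp), hsplit]
            have h0 : sL (ch :: digits) = [] := by
              rw [sL, streetLoop_skip ch digits [] hf hc hr, ← sL, sL_digits digits h]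
            rw [h0]
            simp

theorem alt_eq_sL (s : String) : parse_compact_actions_py_alt s = sL s.toList := by
  rw [parse_compact_actions_py_alt, bLoop_spec s.toList.reverse [] [] (by simp)]
  simp

theorem foldl_conc (ps : List (List Char)) : ∀ acc : List String,
    ps.foldl (fun a st => streetLoop st a) acc = acc ++ conc ps := by
  induction ps with
  | nil => intro acc; simp [conc]
  | cons p ps ih =>
    intro acc
    rw [List.foldl_cons, ih (streetLoop p acc), streetLoop_acc]
    simp [conc]

theorem conc_append (a b : List (List Char)) : conc (a ++ b) = conc a ++ conc b := by
  simp [conc]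

theorem go_spec (fuel : Nat) : ∀ (l cur : List Char) (acc : List (List Char)), l.length ≤ fuel →
    conc (PySem.Chars.splitOn.go ['/'] fuel l cur acc) = conc acc.reverse ++ sL (cur.reverse ++ l) := by
  induction fuel with
  | zero =>
    intro l cur acc hl
    have : l = [] := by cases l <;> simp_all
    subst this
    simp only [PySem.Chars.splitOn.go, List.reverse_cons]
    rw [conc_append]; simp [conc]
  | succ fuel ih =>
    intro l cur acc hl
    cases l with
    | nil =>
      simp only [PySem.Chars.splitOn.go, List.reverse_cons]
      rw [conc_append]; simp [conc]
    | cons c rest =>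
      simp only [PySem.Chars.splitOn.go]
      by_cases hc : c = '/'
      · subst hc
        rw [if_pos (by simp [List.isPrefixOf])]
        have hr : rest.length ≤ fuel := by simp at hl; omega
        rw [show List.drop ['/'].length ('/' :: rest) = rest from rfl, ih rest [] _ hr]
        have h1 : sL ('/' :: rest) = sL rest := by
          rw [sL, streetLoop_skip '/' rest [] (by decide) (by decide) (by decide), ← sL]
        rw [List.reverse_cons, conc_append,
          streetLoop_split cur.reverse ('/' :: rest) (takeWhile_cons_false '/' rest (by decide)), h1]
        simp [conc, sL]
      · rw [if_neg (by simp [List.isPrefixOf]; exact fun h => hc h.symm)]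
        have hr : rest.length ≤ fuel := by simp at hl; omega
        rw [ih rest (c :: cur) acc hr]
        simp [List.append_assoc]

theorem a_eq_sL (s : String) : parse_compact_actions_py s = sL s.toList := by
  rw [parse_compact_actions_py, foldl_conc, PySem.Chars.splitOn,
    go_spec (s.toList.length + 1) s.toList [] [] (by omega)]
  simp [conc]

-- ===== VERDICT (by name: the statement is the Claim_ definition above) =====
theorem parse_compact_actions_py_spec : Claim_equal_parse_compact_actions_py := by
  intro s _
  unfold Spec_parse_compact_actions_py
  rw [a_eq_sL, alt_eq_sL]
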